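-- pv_equiv track=rewrite | github.com/yashanand1910/solutions | algomonster/miscellaneous/train_ride.py | train_ride
-- ===== SOURCE A (Python) =====
-- from typing import List
--
-- class UnionFind:
--     def __init__(self):
--         self.id = {}
--
--     def find(self, x):
--         y = self.id.get(x, x)
--         if y != x:
--             self.id[x] = y = self.find(y)
--         return y
--
--     def union(self, x, y):
--         self.id[self.find(x)] = self.find(y)
--
-- def train_ride(n: int, k: int, connections: List[List[int]]) -> int:
--     dsu = UnionFind()
--     lines = [[] for i in range(k)]
--     for i, j, line in connections:
--         lines[line - 1].append([i, j])
--
--     for line_no, line in enumerate(lines):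
--         for i, j in line:
--             dsu.union(i, j)
--         if dsu.find(1) == dsu.find(n):
--             return line_no + 1
--
--     return -1
-- ===== SOURCE B (Python) =====
-- from typing import List
--
--
-- def train_ride(n: int, k: int, connections: List[List[int]]) -> int:
--     # Group edges by line (Python's usual list indexing, as in the grouping pass of A).
--     buckets = [[] for _ in range(k)]
--     for i, j, line in connections:
--         buckets[line - 1].append((i, j))
--
--     def connected(m: int) -> bool:
--         # Fresh union-find over all edges of the first m lines; plain iterative find,
--         # no path compression.
--         parent = {}
--
--         def find(x):
--             while parent.get(x, x) != x:
--                 x = parent[x]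
--             return x
--
--         for b in buckets[:m]:
--             for i, j in b:
--                 parent[find(i)] = find(j)
--         return find(1) == find(n)
--
--     # connected(m) is monotone in m: binary-search the smallest m with connected(m).
--     lo, hi, ans = 1, k, -1
--     while lo <= hi:
--         mid = (lo + hi) // 2
--         if connected(mid):
--             ans, hi = mid, mid - 1
--         else:
--             lo = mid + 1
--     return ans
-- ===== Notes on version B (the rewrite author's own statement) =====
-- stated objective: alternative
-- what changed: Replaced A's single incremental path-compressing union-find scanned line by line with a binary search over the number of lines, each probe testing connectivity with a fresh compression-free union-find over the edges of the first m lines (connectivity is monotone in m).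
import Mathlib
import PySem

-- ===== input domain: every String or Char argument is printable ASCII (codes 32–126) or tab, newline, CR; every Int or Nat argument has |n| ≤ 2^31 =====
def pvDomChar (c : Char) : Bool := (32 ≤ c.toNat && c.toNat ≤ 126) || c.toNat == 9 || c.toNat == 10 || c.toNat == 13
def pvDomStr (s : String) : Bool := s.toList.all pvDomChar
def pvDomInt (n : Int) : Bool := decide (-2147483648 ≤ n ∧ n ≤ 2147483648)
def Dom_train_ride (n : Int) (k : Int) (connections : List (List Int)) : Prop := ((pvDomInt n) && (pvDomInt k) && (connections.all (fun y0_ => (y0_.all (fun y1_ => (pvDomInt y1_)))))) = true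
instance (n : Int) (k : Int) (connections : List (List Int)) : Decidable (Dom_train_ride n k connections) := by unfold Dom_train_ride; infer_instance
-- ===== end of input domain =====

-- B replaces A's single incremental path-compressing union-find scan over the lines by a
-- binary search on the number of lines, each probe rebuilding a fresh compression-free
-- union-find; same return value on every input where A returns (objective: alternative).

-- ===== PORT A =====

-- Both Pythons group the edges by line with the identical loop
-- 'for i, j, line in connections: buckets[line - 1].append(...)'; this shared helper
-- transliterates that grouping (Python negative list indexing included).
def pvBuckets (k : Int) (connections : List (List Int)) : List (List (Int × Int)) :=
  connections.foldl (fun ls c =>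
    match c with
    | [i, j, line] =>
      let t : Int := line - 1
      let idx : Int := if t < 0 then t + (ls.length : Int) else t
      if 0 ≤ idx ∧ idx.toNat < ls.length then
        ls.set idx.toNat ((ls.getD idx.toNat []) ++ [(i, j)])
      else ls  -- Python raises IndexError here; excluded by Pre_
    | _ => ls  -- Python raises ValueError (tuple unpack) here; excluded by Pre_
  ) (List.replicate k.toNat [])

-- UnionFind.find with path compression; fuel makes the Python recursion structural
-- (fuel d.size + 1 always suffices: parent chains are acyclic and pass through keys only).
def pvFindA : Nat → PySem.Dict Int Int → Int → Int × PySem.Dict Int Int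
  | 0, d, x => (x, d)  -- fuel guard, unreachable for the fuel the callers pass
  | Nat.succ f, d, x =>
    let y := d.getD x x
    if y = x then (x, d)
    else
      let p := pvFindA f d y
      (p.1, p.2.insert x p.1)

-- UnionFind.union: Python evaluates the right-hand side self.find(y) first, then the
-- subscript self.find(x), then stores.
def pvUnionA (d : PySem.Dict Int Int) (x y : Int) : PySem.Dict Int Int :=
  let p1 := pvFindA (d.size + 1) d y
  let p2 := pvFindA (p1.2.size + 1) p1.2 x
  p2.2.insert p2.1 p1.1

-- 'for line_no, line in enumerate(lines): … if dsu.find(1) == dsu.find(n): return line_no + 1'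
def pvLoopA (n : Int) : PySem.Dict Int Int → Nat → List (List (Int × Int)) → Int
  | _, _, [] => -1
  | d, idx, b :: rest =>
    let d1 := b.foldl (fun d e => pvUnionA d e.1 e.2) d
    let p1 := pvFindA (d1.size + 1) d1 1
    let p2 := pvFindA (p1.2.size + 1) p1.2 n
    if p1.1 = p2.1 then (idx : Int) + 1 else pvLoopA n p2.2 (idx + 1) rest

def train_ride (n : Int) (k : Int) (connections : List (List Int)) : Int :=
  pvLoopA n PySem.Dict.empty 0 (pvBuckets k connections)

-- ===== PORT B =====

-- Source B's find: plain iterative parent walk, no compression (fuel as above).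
def pvFindB : Nat → PySem.Dict Int Int → Int → Int
  | 0, _, x => x
  | Nat.succ f, d, x =>
    let y := d.getD x x
    if y = x then x else pvFindB f d y

-- Source B's connected(m): fresh union-find over all edges of the first m buckets.
def pvConnB (n : Int) (buckets : List (List (Int × Int))) (m : Int) : Bool :=
  let d : PySem.Dict Int Int :=
    (buckets.take m.toNat).foldl (fun d b =>
      b.foldl (fun d e =>
        let rj := pvFindB (d.size + 1) d e.2
        let ri := pvFindB (d.size + 1) d e.1
        d.insert ri rj) d) PySem.Dict.empty
  pvFindB (d.size + 1) d 1 == pvFindB (d.size + 1) d n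

-- Source B's while-loop binary search on [lo, hi] carrying the best answer found so far.
def pvBSearch (n : Int) (buckets : List (List (Int × Int))) (lo hi ans : Int) : Int :=
  if h : lo ≤ hi then
    let mid := PySem.Int.floordiv (lo + hi) 2
    if pvConnB n buckets mid then pvBSearch n buckets lo (mid - 1) mid
    else pvBSearch n buckets (mid + 1) hi ans
  else ans
termination_by (hi + 1 - lo).toNat
decreasing_by
  · have := PySem.Int.floordiv_two_mid_bounds h; omega
  · have := PySem.Int.floordiv_two_mid_bounds h; omega

def train_ride_alt (n : Int) (k : Int) (connections : List (List Int)) : Int :=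
  pvBSearch n (pvBuckets k connections) 1 k (-1)

-- ===== PRECONDITION & SPEC =====

-- Pre_ excludes exactly the inputs on which the Python A raises: a row that is not a
-- triple [i, j, line] (ValueError on unpacking) or whose line index line-1 falls outside
-- Python's accepted index range [-k, k-1] of the bucket list (IndexError).
def Pre_train_ride (_n : Int) (k : Int) (connections : List (List Int)) : Prop :=
  ∀ c ∈ connections, c.length = 3 ∧ 1 - k ≤ c.getD 2 0 ∧ c.getD 2 0 ≤ k

instance (n : Int) (k : Int) (connections : List (List Int)) : Decidable (Pre_train_ride n k connections) := by
  unfold Pre_train_ride; infer_instance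

def pvWitness_train_ride : Int × Int × List (List Int) := (4, 3, [[1, 2, 1], [2, 3, 2], [3, 4, 3]])

def Spec_train_ride (n : Int) (k : Int) (connections : List (List Int)) (out : Int) : Prop := out = train_ride_alt n k connections
instance (n : Int) (k : Int) (connections : List (List Int)) (out : Int) : Decidable (Spec_train_ride n k connections out) := by unfold Spec_train_ride; infer_instance

-- ===== CLAIM (what is proved, stated in full; the proofs are below) =====
def Claim_equal_train_ride : Prop := ∀ (n : Int) (k : Int) (connections : List (List Int)), Dom_train_ride n k connections → Pre_train_ride n k connections → Spec_train_ride n k connections (train_ride n k connections)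

-- ===== LEMMAS AND PROOFS =====

-- The parent function of a union-find dictionary: `d.get(x, x)`.
def pvPd (d : PySem.Dict Int Int) (x : Int) : Int := d.getD x x

-- `d` represents the root function `rt`: every node has a parent chain reaching `rt x`,
-- and `rt x` is a fixed point of the parent function.
def pvRep (d : PySem.Dict Int Int) (rt : Int → Int) : Prop :=
  ∀ x : Int, (∃ m : Nat, (pvPd d)^[m] x = rt x) ∧ pvPd d (rt x) = rt x

-- Pure merge step on root functions: union (i, j) maps the class of i onto the class of j.
def pvMStep (rt : Int → Int) (e : Int × Int) : Int → Int :=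
  fun z => if rt z = rt e.1 then rt e.2 else rt z

def pvRTF (bs : List (List (Int × Int))) (rt : Int → Int) : Int → Int :=
  bs.foldl (fun rt b => b.foldl pvMStep rt) rt

def pvRT (bs : List (List (Int × Int))) : Int → Int := pvRTF bs id

def pvQ (n : Int) (buckets : List (List (Int × Int))) (t : Nat) : Prop :=
  pvRT (buckets.take t) 1 = pvRT (buckets.take t) n

-- Nat-level characterisation of "first line index (1-based) connecting 1 and n, else -1".
def pvIsAnsN (n : Int) (buckets : List (List (Int × Int))) (r : Int) : Prop :=
  (r = -1 ∧ ∀ t : Nat, 1 ≤ t → t ≤ buckets.length → ¬ pvQ n buckets t) ∨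
  (∃ t : Nat, r = (t : Int) ∧ 1 ≤ t ∧ t ≤ buckets.length ∧ pvQ n buckets t ∧
    ∀ s : Nat, 1 ≤ s → s < t → ¬ pvQ n buckets s)

-- Int-level characterisation with the search bound k.
def pvIsAnsI (n : Int) (buckets : List (List (Int × Int))) (k : Int) (r : Int) : Prop :=
  (r = -1 ∧ ∀ m : Int, 1 ≤ m → m ≤ k → ¬ pvQ n buckets m.toNat) ∨
  (1 ≤ r ∧ r ≤ k ∧ pvQ n buckets r.toNat ∧ ∀ m : Int, 1 ≤ m → m < r → ¬ pvQ n buckets m.toNat)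

lemma pvRoot_unique {f : Int → Int} {a b : Nat} {z r r' : Int}
    (h1 : f^[a] z = r) (hr : f r = r) (h2 : f^[b] z = r') (hr' : f r' = r') : r = r' := by
  have e1 : f^[b + a] z = r := by
    rw [Function.iterate_add_apply, h1, Function.iterate_fixed hr]
  have e2 : f^[a + b] z = r' := by
    rw [Function.iterate_add_apply, h2, Function.iterate_fixed hr']
  rw [Nat.add_comm b a] at e1
  rw [e1] at e2
  exact e2

lemma pvRep_fix {d : PySem.Dict Int Int} {rt : Int → Int} (h : pvRep d rt) {x : Int}
    (hx : pvPd d x = x) : rt x = x := by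
  obtain ⟨⟨m, hm⟩, -⟩ := h x
  rw [Function.iterate_fixed hx] at hm
  exact hm.symm

lemma pvRep_rt_rt {d : PySem.Dict Int Int} {rt : Int → Int} (h : pvRep d rt) (x : Int) :
    rt (rt x) = rt x := pvRep_fix h (h x).2

lemma pvRep_step {d : PySem.Dict Int Int} {rt : Int → Int} (h : pvRep d rt) (x : Int) :
    rt (pvPd d x) = rt x := by
  by_cases hx : pvPd d x = x
  · rw [hx]
  · obtain ⟨⟨m, hm⟩, hroot⟩ := h x
    obtain ⟨⟨m2, hm2⟩, hroot2⟩ := h (pvPd d x)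
    cases m with
    | zero =>
      simp only [Function.iterate_zero, id] at hm
      rw [← hm] at hroot; exact absurd hroot hx
    | succ m' =>
      rw [Function.iterate_succ_apply] at hm
      exact pvRoot_unique hm2 hroot2 hm hroot

lemma pvKey_of_pd_ne {d : PySem.Dict Int Int} {u : Int} (h : pvPd d u ≠ u) : u ∈ d.keys := by
  unfold pvPd at h
  rw [PySem.Dict.getD_eq_get?_getD] at h
  cases hg : d.get? u with
  | none => rw [hg] at h; simp at h
  | some v => exact PySem.Dict.mem_keys_of_mem_items d (PySem.Dict.mem_items_of_get?_eq_some d hg)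

lemma pvChain_bound {d : PySem.Dict Int Int} {z r : Int} {m : Nat}
    (h : (pvPd d)^[m] z = r) : ∃ m' ≤ d.size, (pvPd d)^[m'] z = r := by
  set f := pvPd d with hf
  have hex : ∃ t, f^[t] z = r := ⟨m, h⟩
  have hM : f^[Nat.find hex] z = r := Nat.find_spec hex
  have hmin : ∀ t, t < Nat.find hex → f^[t] z ≠ r := fun t ht => Nat.find_min hex ht
  set M := Nat.find hex with hMdef
  refine ⟨M, ?_, hM⟩
  have hinj : ∀ a ∈ List.range M, ∀ b ∈ List.range M, f^[a] z = f^[b] z → a = b := by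
    have key : ∀ a b : Nat, a < b → b < M → f^[a] z ≠ f^[b] z := by
      intro a b hab hbM heq
      have : f^[M] z = f^[M - b + a] z := by
        have h1 : M = (M - b) + b := by omega
        calc f^[M] z = f^[(M - b) + b] z := by rw [← h1]
          _ = f^[M - b] (f^[b] z) := Function.iterate_add_apply f _ _ z
          _ = f^[M - b] (f^[a] z) := by rw [heq]
          _ = f^[M - b + a] z := (Function.iterate_add_apply f _ _ z).symm
      exact hmin (M - b + a) (by omega) (by rw [← this]; exact hM)
    intro a ha b hb heq
    simp only [List.mem_range] at ha hb
    rcases Nat.lt_trichotomy a b with hlt | heqn | hgt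
    · exact absurd heq (key a b hlt hb)
    · exact heqn
    · exact absurd heq.symm (key b a hgt ha)
  have hmem : ∀ t, t < M → f^[t] z ∈ d.keys := by
    intro t ht
    refine pvKey_of_pd_ne (u := f^[t] z) ?_
    intro hfix
    have : f^[M] z = f^[t] z := by
      have h1 : M = (M - t) + t := by omega
      calc f^[M] z = f^[(M - t) + t] z := by rw [← h1]
        _ = f^[M - t] (f^[t] z) := Function.iterate_add_apply f _ _ z
        _ = f^[t] z := Function.iterate_fixed hfix _
    exact hmin t ht (by rw [← this]; exact hM)
  have hnodup : ((List.range M).map (fun t => f^[t] z)).Nodup :=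
    List.Nodup.map_on hinj (List.nodup_range)
  have hsub : ((List.range M).map (fun t => f^[t] z)) ⊆ d.keys := by
    intro u hu
    obtain ⟨t, ht, rfl⟩ := List.mem_map.mp hu
    exact hmem t (List.mem_range.mp ht)
  have hcard : ((List.range M).map (fun t => f^[t] z)).toFinset.card ≤ d.keys.toFinset.card :=
    Finset.card_le_card (fun u hu => List.mem_toFinset.mpr (hsub (List.mem_toFinset.mp hu)))
  have h1 : ((List.range M).map (fun t => f^[t] z)).toFinset.card = M := by
    rw [List.toFinset_card_of_nodup hnodup]; simp
  have h2 : d.keys.toFinset.card ≤ d.size := by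
    calc d.keys.toFinset.card ≤ d.keys.length := List.toFinset_card_le _
      _ = d.size := by simp [PySem.Dict.keys, PySem.Dict.size]
  omega

lemma pvPd_insert (d : PySem.Dict Int Int) (a v z : Int) :
    pvPd (d.insert a v) z = if z = a then v else pvPd d z := by
  unfold pvPd; rw [PySem.Dict.getD_insert]

lemma pvRep_empty : pvRep PySem.Dict.empty id := by
  intro x
  refine ⟨⟨0, rfl⟩, ?_⟩
  simp [pvPd, PySem.Dict.getD_empty]

lemma pvRep_insert_compress {d : PySem.Dict Int Int} {rt : Int → Int} (h : pvRep d rt)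
    (x : Int) : pvRep (d.insert x (rt x)) rt := by
  have hroot : ∀ z : Int, pvPd (d.insert x (rt x)) (rt z) = rt z := by
    intro z
    rw [pvPd_insert]
    by_cases hz : rt z = x
    · have hxx : rt x = x := by rw [← hz, pvRep_rt_rt h]
      simp [hz, hxx]
    · simp [hz, (h z).2]
  have aux : ∀ (m : Nat) (z : Int), (pvPd d)^[m] z = rt z →
      ∃ m', (pvPd (d.insert x (rt x)))^[m'] z = rt z := by
    intro m
    induction m with
    | zero =>
      intro z hz
      exact ⟨0, hz⟩
    | succ m ih =>
      intro z hz
      by_cases hzx : z = x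
      · subst hzx
        refine ⟨1, ?_⟩
        simp [pvPd_insert]
      · by_cases hfix : pvPd d z = z
        · exact ⟨0, by simpa using (pvRep_fix h hfix).symm⟩
        · have hz' : (pvPd d)^[m] (pvPd d z) = rt z := by
            rw [← Function.iterate_succ_apply]; exact hz
          have hstep : rt (pvPd d z) = rt z := pvRep_step h z
          obtain ⟨m', hm'⟩ := ih (pvPd d z) (by rw [hz']; exact hstep.symm)
          refine ⟨m' + 1, ?_⟩
          rw [Function.iterate_succ_apply, pvPd_insert, if_neg hzx, hm', hstep]
  intro z
  obtain ⟨⟨m, hm⟩, -⟩ := h z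
  exact ⟨aux m z hm, hroot z⟩

lemma pvRep_insert_merge {d : PySem.Dict Int Int} {rt : Int → Int} (h : pvRep d rt)
    (x y : Int) :
    pvRep (d.insert (rt x) (rt y)) (fun z => if rt z = rt x then rt y else rt z) := by
  set d' := d.insert (rt x) (rt y) with hd'
  have hrtx : rt (rt x) = rt x := pvRep_rt_rt h x
  have hroot : ∀ z : Int, rt z ≠ rt x → pvPd d' (rt z) = rt z := by
    intro z hz
    rw [hd', pvPd_insert, if_neg hz]
    exact (h z).2
  have hrooty : pvPd d' (rt y) = rt y := by
    rw [hd', pvPd_insert]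
    split
    · rfl
    · exact (h y).2
  have aux : ∀ (m : Nat) (z : Int), (pvPd d)^[m] z = rt z →
      ∃ m', (pvPd d')^[m'] z = (if rt z = rt x then rt y else rt z) := by
    intro m
    induction m with
    | zero =>
      intro z hz
      simp only [Function.iterate_zero, id] at hz
      by_cases hzx : rt z = rt x
      · rw [if_pos hzx]
        refine ⟨1, ?_⟩
        simp only [Function.iterate_one, hd', pvPd_insert, if_pos (hz.trans hzx)]
      · rw [if_neg hzx]
        exact ⟨0, by simpa using hz⟩
    | succ m ih =>
      intro z hz
      by_cases hzrx : z = rt x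
      · have hcond : rt z = rt x := by rw [hzrx, hrtx]
        rw [if_pos hcond]
        refine ⟨1, ?_⟩
        simp only [Function.iterate_one, hd', pvPd_insert, if_pos hzrx]
      · by_cases hfix : pvPd d z = z
        · have hz0 : rt z = z := pvRep_fix h hfix
          have hzx : rt z ≠ rt x := fun hc => hzrx (hz0.symm.trans hc)
          rw [if_neg hzx]
          exact ⟨0, by simpa using hz0.symm⟩
        · have hz' : (pvPd d)^[m] (pvPd d z) = rt z := by
            rw [← Function.iterate_succ_apply]; exact hz
          have hstep : rt (pvPd d z) = rt z := pvRep_step h z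
          obtain ⟨m', hm'⟩ := ih (pvPd d z) (by rw [hz']; exact hstep.symm)
          rw [hstep] at hm'
          refine ⟨m' + 1, ?_⟩
          rw [Function.iterate_succ_apply, hd', pvPd_insert, if_neg hzrx]
          exact hm'
  intro z
  refine ⟨?_, ?_⟩
  · obtain ⟨⟨m, hm⟩, -⟩ := h z
    exact aux m z hm
  · by_cases hzx : rt z = rt x
    · simp only [hzx, if_true]
      exact hrooty
    · simp only [if_neg hzx]
      exact hroot z hzx

lemma pvFindA_go : ∀ (f : Nat) (d : PySem.Dict Int Int) (rt : Int → Int) (x : Int) (m : Nat),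
    pvRep d rt → (pvPd d)^[m] x = rt x → m < f →
    (pvFindA f d x).1 = rt x ∧ pvRep (pvFindA f d x).2 rt := by
  intro f
  induction f with
  | zero => intro d rt x m h hc hm; omega
  | succ f ih =>
    intro d rt x m h hc hm
    by_cases hy : d.getD x x = x
    · simp only [pvFindA]
      rw [if_pos hy]
      exact ⟨(pvRep_fix h hy).symm, h⟩
    · cases m with
      | zero =>
        simp only [Function.iterate_zero, id] at hc
        have h2 := (h x).2
        rw [← hc] at h2
        exact absurd h2 hy
      | succ m0 =>
        rw [Function.iterate_succ_apply] at hc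
        have hc' : (pvPd d)^[m0] (pvPd d x) = rt (pvPd d x) := by
          rw [hc]; exact (pvRep_step h x).symm
        have hrec := ih d rt (pvPd d x) m0 h hc' (by omega)
        have hpd : d.getD x x = pvPd d x := rfl
        simp only [pvFindA]
        rw [if_neg hy]
        constructor
        · show (pvFindA f d (d.getD x x)).1 = rt x
          rw [hpd, hrec.1, pvRep_step h x]
        · show pvRep ((pvFindA f d (d.getD x x)).2.insert x (pvFindA f d (d.getD x x)).1) rt
          rw [hpd, hrec.1, pvRep_step h x]
          exact pvRep_insert_compress hrec.2 x

lemma pvFindA_spec {d : PySem.Dict Int Int} {rt : Int → Int} (h : pvRep d rt) (x : Int) :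
    (pvFindA (d.size + 1) d x).1 = rt x ∧ pvRep (pvFindA (d.size + 1) d x).2 rt := by
  obtain ⟨⟨m, hm⟩, -⟩ := h x
  obtain ⟨m', hm', hc⟩ := pvChain_bound hm
  exact pvFindA_go _ d rt x m' h hc (by omega)

lemma pvFindB_go : ∀ (f : Nat) (d : PySem.Dict Int Int) (rt : Int → Int) (x : Int) (m : Nat),
    pvRep d rt → (pvPd d)^[m] x = rt x → m < f → pvFindB f d x = rt x := by
  intro f
  induction f with
  | zero => intro d rt x m h hc hm; omega
  | succ f ih =>
    intro d rt x m h hc hm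
    by_cases hy : d.getD x x = x
    · simp only [pvFindB]
      rw [if_pos hy]
      exact (pvRep_fix h hy).symm
    · cases m with
      | zero =>
        simp only [Function.iterate_zero, id] at hc
        have h2 := (h x).2
        rw [← hc] at h2
        exact absurd h2 hy
      | succ m0 =>
        rw [Function.iterate_succ_apply] at hc
        have hc' : (pvPd d)^[m0] (pvPd d x) = rt (pvPd d x) := by
          rw [hc]; exact (pvRep_step h x).symm
        have hrec := ih d rt (pvPd d x) m0 h hc' (by omega)
        have hpd : d.getD x x = pvPd d x := rfl
        simp only [pvFindB]
        rw [if_neg hy]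
        show pvFindB f d (d.getD x x) = rt x
        rw [hpd, hrec, pvRep_step h x]

lemma pvFindB_spec {d : PySem.Dict Int Int} {rt : Int → Int} (h : pvRep d rt) (x : Int) :
    pvFindB (d.size + 1) d x = rt x := by
  obtain ⟨⟨m, hm⟩, -⟩ := h x
  obtain ⟨m', hm', hc⟩ := pvChain_bound hm
  exact pvFindB_go _ d rt x m' h hc (by omega)

lemma pvUnionA_spec {d : PySem.Dict Int Int} {rt : Int → Int} (h : pvRep d rt) (x y : Int) :
    pvRep (pvUnionA d x y) (pvMStep rt (x, y)) := by
  unfold pvUnionA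
  obtain ⟨h1a, h1b⟩ := pvFindA_spec h y
  obtain ⟨h2a, h2b⟩ := pvFindA_spec h1b x
  show pvRep
      ((pvFindA ((pvFindA (d.size + 1) d y).2.size + 1) (pvFindA (d.size + 1) d y).2 x).2.insert
        (pvFindA ((pvFindA (d.size + 1) d y).2.size + 1) (pvFindA (d.size + 1) d y).2 x).1
        (pvFindA (d.size + 1) d y).1)
      (pvMStep rt (x, y))
  rw [h1a, h2a]
  exact pvRep_insert_merge h2b x y

lemma pvBucketA_rep : ∀ (b : List (Int × Int)) (d : PySem.Dict Int Int) (rt : Int → Int),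
    pvRep d rt → pvRep (b.foldl (fun d e => pvUnionA d e.1 e.2) d) (b.foldl pvMStep rt) := by
  intro b
  induction b with
  | nil => intro d rt h; exact h
  | cons e rest ih =>
    intro d rt h
    exact ih _ _ (pvUnionA_spec h e.1 e.2)

-- A's search loop equals the pure scan pvPure.
def pvPure (n : Int) : (Int → Int) → Nat → List (List (Int × Int)) → Int
  | _, _, [] => -1
  | rt, idx, b :: rest =>
    let rt' := b.foldl pvMStep rt
    if rt' 1 = rt' n then (idx : Int) + 1 else pvPure n rt' (idx + 1) rest

lemma pvLoopA_pure : ∀ (bs : List (List (Int × Int))) (d : PySem.Dict Int Int)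
    (rt : Int → Int) (idx : Nat) (n : Int), pvRep d rt →
    pvLoopA n d idx bs = pvPure n rt idx bs := by
  intro bs
  induction bs with
  | nil => intro d rt idx n h; rfl
  | cons b rest ih =>
    intro d rt idx n h
    have hd1 := pvBucketA_rep b d rt h
    obtain ⟨p1a, p1b⟩ := pvFindA_spec hd1 1
    obtain ⟨p2a, p2b⟩ := pvFindA_spec p1b n
    have e1 : pvLoopA n d idx (b :: rest) =
        (if (pvFindA ((b.foldl (fun d e => pvUnionA d e.1 e.2) d).size + 1)
              (b.foldl (fun d e => pvUnionA d e.1 e.2) d) 1).1 =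
            (pvFindA ((pvFindA ((b.foldl (fun d e => pvUnionA d e.1 e.2) d).size + 1)
                (b.foldl (fun d e => pvUnionA d e.1 e.2) d) 1).2.size + 1)
              (pvFindA ((b.foldl (fun d e => pvUnionA d e.1 e.2) d).size + 1)
                (b.foldl (fun d e => pvUnionA d e.1 e.2) d) 1).2 n).1
         then ((idx : Int) + 1)
         else pvLoopA n
            (pvFindA ((pvFindA ((b.foldl (fun d e => pvUnionA d e.1 e.2) d).size + 1)
                (b.foldl (fun d e => pvUnionA d e.1 e.2) d) 1).2.size + 1)
              (pvFindA ((b.foldl (fun d e => pvUnionA d e.1 e.2) d).size + 1)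
                (b.foldl (fun d e => pvUnionA d e.1 e.2) d) 1).2 n).2 (idx + 1) rest) := rfl
    have e2 : pvPure n rt idx (b :: rest) =
        (if (b.foldl pvMStep rt) 1 = (b.foldl pvMStep rt) n then ((idx : Int) + 1)
         else pvPure n (b.foldl pvMStep rt) (idx + 1) rest) := rfl
    rw [e1, e2, p1a, p2a]
    by_cases hc : (b.foldl pvMStep rt) 1 = (b.foldl pvMStep rt) n
    · rw [if_pos hc, if_pos hc]
    · rw [if_neg hc, if_neg hc]
      exact ih _ _ _ n p2b

lemma pvBuildB_rep : ∀ (bs : List (List (Int × Int))) (d : PySem.Dict Int Int) (rt : Int → Int),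
    pvRep d rt →
    pvRep (bs.foldl (fun d b =>
        b.foldl (fun d e =>
          let rj := pvFindB (d.size + 1) d e.2
          let ri := pvFindB (d.size + 1) d e.1
          d.insert ri rj) d) d)
      (pvRTF bs rt) := by
  have hbucket : ∀ (b : List (Int × Int)) (d : PySem.Dict Int Int) (rt : Int → Int),
      pvRep d rt →
      pvRep (b.foldl (fun d e =>
          let rj := pvFindB (d.size + 1) d e.2
          let ri := pvFindB (d.size + 1) d e.1
          d.insert ri rj) d) (b.foldl pvMStep rt) := by
    intro b
    induction b with
    | nil => intro d rt h; exact h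
    | cons e rest ih =>
      intro d rt h
      apply ih
      show pvRep (d.insert (pvFindB (d.size + 1) d e.1) (pvFindB (d.size + 1) d e.2)) (pvMStep rt e)
      rw [pvFindB_spec h e.1, pvFindB_spec h e.2]
      exact pvRep_insert_merge h e.1 e.2
  intro bs
  induction bs with
  | nil => intro d rt h; exact h
  | cons b rest ih =>
    intro d rt h
    exact ih _ _ (hbucket b d rt h)

lemma pvConnB_eq (n : Int) (buckets : List (List (Int × Int))) (m : Int) :
    pvConnB n buckets m = true ↔ pvQ n buckets m.toNat := by
  have hrep := pvBuildB_rep (buckets.take m.toNat) PySem.Dict.empty id pvRep_empty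
  have e1 : pvConnB n buckets m =
      (pvFindB (((buckets.take m.toNat).foldl (fun d b =>
          b.foldl (fun d e =>
            let rj := pvFindB (d.size + 1) d e.2
            let ri := pvFindB (d.size + 1) d e.1
            d.insert ri rj) d) PySem.Dict.empty).size + 1)
        ((buckets.take m.toNat).foldl (fun d b =>
          b.foldl (fun d e =>
            let rj := pvFindB (d.size + 1) d e.2
            let ri := pvFindB (d.size + 1) d e.1
            d.insert ri rj) d) PySem.Dict.empty) 1 ==
       pvFindB (((buckets.take m.toNat).foldl (fun d b =>
          b.foldl (fun d e =>
            let rj := pvFindB (d.size + 1) d e.2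
            let ri := pvFindB (d.size + 1) d e.1
            d.insert ri rj) d) PySem.Dict.empty).size + 1)
        ((buckets.take m.toNat).foldl (fun d b =>
          b.foldl (fun d e =>
            let rj := pvFindB (d.size + 1) d e.2
            let ri := pvFindB (d.size + 1) d e.1
            d.insert ri rj) d) PySem.Dict.empty) n) := rfl
  rw [e1, pvFindB_spec hrep 1, pvFindB_spec hrep n]
  simp [pvQ, pvRT, beq_iff_eq]

lemma pvMFold_preserve : ∀ (es : List (Int × Int)) (rt : Int → Int) (z w : Int),
    rt z = rt w → es.foldl pvMStep rt z = es.foldl pvMStep rt w := by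
  intro es
  induction es with
  | nil => intro rt z w h; exact h
  | cons e rest ih =>
    intro rt z w h
    exact ih _ _ _ (by simp only [pvMStep, h])

lemma pvRTF_preserve : ∀ (bs : List (List (Int × Int))) (rt : Int → Int) (z w : Int),
    rt z = rt w → pvRTF bs rt z = pvRTF bs rt w := by
  intro bs
  induction bs with
  | nil => intro rt z w h; exact h
  | cons b rest ih =>
    intro rt z w h
    exact ih _ _ _ (pvMFold_preserve b rt z w h)

lemma pvQ_mono {n : Int} {buckets : List (List (Int × Int))} {a b : Nat} (hab : a ≤ b)
    (h : pvQ n buckets a) : pvQ n buckets b := by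
  have hsplit : ∀ (l1 l2 : List (List (Int × Int))), pvRT (l1 ++ l2) = pvRTF l2 (pvRT l1) := by
    intro l1 l2; simp [pvRT, pvRTF, List.foldl_append]
  have ht : buckets.take b = buckets.take a ++ (buckets.take b).drop a := by
    conv_lhs => rw [← List.take_append_drop a (buckets.take b)]
    rw [List.take_take, Nat.min_eq_left hab]
  unfold pvQ at h ⊢
  rw [ht, hsplit]
  exact pvRTF_preserve _ _ _ _ h

lemma pvPure_isans (n : Int) (buckets : List (List (Int × Int))) :
    ∀ (bs : List (List (Int × Int))) (idx : Nat), bs = buckets.drop idx →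
    idx ≤ buckets.length →
    (∀ t : Nat, 1 ≤ t → t ≤ idx → ¬ pvQ n buckets t) →
    pvIsAnsN n buckets (pvPure n (pvRT (buckets.take idx)) idx bs) := by
  intro bs
  induction bs with
  | nil =>
    intro idx hdrop hlen hprev
    left
    refine ⟨rfl, ?_⟩
    have hge : buckets.length ≤ idx := by
      have := congrArg List.length hdrop
      simp [List.length_drop] at this
      omega
    intro t h1 h2
    exact hprev t h1 (by omega)
  | cons b rest ih =>
    intro idx hdrop hlen hprev
    have hlend := congrArg List.length hdrop
    simp [List.length_drop] at hlend
    have hidx : idx < buckets.length := by omega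
    have hget : buckets[idx]? = some b := by
      have h0 : (buckets.drop idx)[0]? = buckets[idx + 0]? := List.getElem?_drop
      rw [← hdrop] at h0
      simpa using h0.symm
    have htake : buckets.take (idx + 1) = buckets.take idx ++ [b] := by
      rw [List.take_add_one, hget]
      rfl
    have hdrop' : rest = buckets.drop (idx + 1) := by
      have h1 : buckets.drop (idx + 1) = (buckets.drop idx).drop 1 := by
        rw [List.drop_drop, Nat.add_comm]
      rw [h1, ← hdrop]
      rfl
    have hrt' : b.foldl pvMStep (pvRT (buckets.take idx)) = pvRT (buckets.take (idx + 1)) := by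
      rw [htake]
      simp [pvRT, pvRTF, List.foldl_append]
    have hunf : pvPure n (pvRT (buckets.take idx)) idx (b :: rest) =
        (if pvRT (buckets.take (idx + 1)) 1 = pvRT (buckets.take (idx + 1)) n
         then ((idx : Int) + 1)
         else pvPure n (pvRT (buckets.take (idx + 1))) (idx + 1) rest) := by
      rw [← hrt']
      rfl
    rw [hunf]
    by_cases hq : pvQ n buckets (idx + 1)
    · rw [if_pos (show pvRT (buckets.take (idx + 1)) 1 = pvRT (buckets.take (idx + 1)) n from hq)]
      right
      refine ⟨idx + 1, by push_cast; ring, by omega, by omega, hq, ?_⟩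
      intro s h1 h2
      exact hprev s h1 (by omega)
    · rw [if_neg (show ¬ pvRT (buckets.take (idx + 1)) 1 = pvRT (buckets.take (idx + 1)) n from hq)]
      exact ih (idx + 1) hdrop' (by omega) (fun t h1 h2 => by
        rcases Nat.eq_or_lt_of_le h2 with he | hl
        · rw [he]; exact hq
        · exact hprev t h1 (by omega))

lemma pvIsAnsN_to_I {n : Int} {buckets : List (List (Int × Int))} {k r : Int}
    (hk : buckets.length = k.toNat) (h : pvIsAnsN n buckets r) : pvIsAnsI n buckets k r := by
  rcases h with ⟨hr, hall⟩ | ⟨t, hr, h1, h2, hq, hmin⟩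
  · left
    refine ⟨hr, ?_⟩
    intro m hm1 hm2
    exact hall m.toNat (by omega) (by omega)
  · right
    subst hr
    refine ⟨by omega, by omega, ?_, ?_⟩
    · have : ((t : Int)).toNat = t := by omega
      rw [this]; exact hq
    · intro m hm1 hm2
      exact hmin m.toNat (by omega) (by omega)

lemma pvBSearch_isans (n : Int) (buckets : List (List (Int × Int))) (k : Int) :
    ∀ (F : Nat) (lo hi ans : Int), (hi + 1 - lo).toNat ≤ F → 1 ≤ lo → hi ≤ k →
    (∀ m : Int, 1 ≤ m → m < lo → ¬ pvQ n buckets m.toNat) →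
    ((ans = -1 ∧ hi = k) ∨
      (ans = hi + 1 ∧ 1 ≤ ans ∧ ans ≤ k ∧ pvQ n buckets ans.toNat)) →
    pvIsAnsI n buckets k (pvBSearch n buckets lo hi ans) := by
  intro F
  induction F with
  | zero =>
    intro lo hi ans hF h1 hk hprev hinv
    rw [pvBSearch.eq_def]
    rw [dif_neg (by omega : ¬ lo ≤ hi)]
    rcases hinv with ⟨ha, hhi⟩ | ⟨ha, ha1, hak, haq⟩
    · left
      exact ⟨ha, fun m hm1 hm2 => hprev m hm1 (by omega)⟩
    · right
      exact ⟨ha1, hak, haq, fun m hm1 hm2 => hprev m hm1 (by omega)⟩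
  | succ F ih =>
    intro lo hi ans hF h1 hk hprev hinv
    by_cases hlo : lo ≤ hi
    · rw [pvBSearch.eq_def, dif_pos hlo]
      have hmid := PySem.Int.floordiv_two_mid_bounds hlo
      by_cases hcb : pvConnB n buckets (PySem.Int.floordiv (lo + hi) 2) = true
      · have e : (let mid := PySem.Int.floordiv (lo + hi) 2;
            if pvConnB n buckets mid then pvBSearch n buckets lo (mid - 1) mid
            else pvBSearch n buckets (mid + 1) hi ans) =
            pvBSearch n buckets lo (PySem.Int.floordiv (lo + hi) 2 - 1)
              (PySem.Int.floordiv (lo + hi) 2) := by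
          simp only [hcb, if_true]
        rw [e]
        refine ih lo (PySem.Int.floordiv (lo + hi) 2 - 1) (PySem.Int.floordiv (lo + hi) 2)
          (by omega) h1 (by omega) hprev ?_
        right
        refine ⟨by omega, by omega, by omega, ?_⟩
        exact (pvConnB_eq n buckets _).mp hcb
      · have e : (let mid := PySem.Int.floordiv (lo + hi) 2;
            if pvConnB n buckets mid then pvBSearch n buckets lo (mid - 1) mid
            else pvBSearch n buckets (mid + 1) hi ans) =
            pvBSearch n buckets (PySem.Int.floordiv (lo + hi) 2 + 1) hi ans := by
          simp only [hcb, Bool.false_eq_true, if_false]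
        rw [e]
        have hnq : ¬ pvQ n buckets (PySem.Int.floordiv (lo + hi) 2).toNat := by
          intro hq
          exact hcb ((pvConnB_eq n buckets _).mpr hq)
        refine ih (PySem.Int.floordiv (lo + hi) 2 + 1) hi ans (by omega) (by omega) hk ?_ ?_
        · intro m hm1 hm2
          by_cases hmlo : m < lo
          · exact hprev m hm1 hmlo
          · intro hq
            exact hnq (pvQ_mono (by omega) hq)
        · rcases hinv with ⟨ha, hhi⟩ | ⟨ha, ha1, hak, haq⟩
          · left; exact ⟨ha, hhi⟩
          · right; exact ⟨ha, ha1, hak, haq⟩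
    · rw [pvBSearch.eq_def, dif_neg hlo]
      rcases hinv with ⟨ha, hhi⟩ | ⟨ha, ha1, hak, haq⟩
      · left
        exact ⟨ha, fun m hm1 hm2 => hprev m hm1 (by omega)⟩
      · right
        exact ⟨ha1, hak, haq, fun m hm1 hm2 => hprev m hm1 (by omega)⟩

lemma pvIsAnsI_unique {n : Int} {buckets : List (List (Int × Int))} {k r1 r2 : Int}
    (h1 : pvIsAnsI n buckets k r1) (h2 : pvIsAnsI n buckets k r2) : r1 = r2 := by
  rcases h1 with ⟨ha, hall⟩ | ⟨ha1, hak, haq, hamin⟩ <;>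
    rcases h2 with ⟨hb, ball⟩ | ⟨hb1, hbk, hbq, hbmin⟩
  · rw [ha, hb]
  · exact absurd hbq (hall r2 hb1 hbk)
  · exact absurd haq (ball r1 ha1 hak)
  · rcases lt_trichotomy r1 r2 with hlt | heq | hgt
    · exact absurd haq (hbmin r1 ha1 hlt)
    · exact heq
    · exact absurd hbq (hamin r2 hb1 hgt)

lemma pvBuckets_length (k : Int) (connections : List (List Int)) :
    (pvBuckets k connections).length = k.toNat := by
  have aux : ∀ (cs : List (List Int)) (ls : List (List (Int × Int))),
      (cs.foldl (fun ls c =>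
        match c with
        | [i, j, line] =>
          let t : Int := line - 1
          let idx : Int := if t < 0 then t + (ls.length : Int) else t
          if 0 ≤ idx ∧ idx.toNat < ls.length then
            ls.set idx.toNat ((ls.getD idx.toNat []) ++ [(i, j)])
          else ls
        | _ => ls) ls).length = ls.length := by
    intro cs
    induction cs with
    | nil => intro ls; rfl
    | cons c rest ih =>
      intro ls
      rw [List.foldl_cons, ih]
      rcases c with _ | ⟨i, c⟩
      · rfl
      rcases c with _ | ⟨j, c⟩
      · rfl
      rcases c with _ | ⟨line, c⟩
      · rfl
      rcases c with _ | ⟨w, c⟩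
      · simp only []
        split
        · split
          · exact List.length_set ..
          · rfl
        · split
          · exact List.length_set ..
          · rfl
      · rfl
  have := aux connections (List.replicate k.toNat [])
  simpa [pvBuckets] using this

-- ===== VERDICT (by name: the statement is the Claim_ definition above) =====
theorem train_ride_spec : Claim_equal_train_ride := by
  intro n k connections _ _
  unfold Spec_train_ride train_ride train_ride_alt
  have hk := pvBuckets_length k connections
  set buckets := pvBuckets k connections with hb
  have hA : pvIsAnsN n buckets (pvLoopA n PySem.Dict.empty 0 buckets) := by
    rw [pvLoopA_pure buckets PySem.Dict.empty id 0 n pvRep_empty]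
    have := pvPure_isans n buckets buckets 0 (by simp) (by omega) (by omega)
    simpa [pvRT, pvRTF] using this
  have hB : pvIsAnsI n buckets k (pvBSearch n buckets 1 k (-1)) := by
    refine pvBSearch_isans n buckets k (k + 1 - 1).toNat 1 k (-1) (by omega) (by omega)
      (by omega) (by omega) (Or.inl ⟨rfl, rfl⟩)
  exact pvIsAnsI_unique (pvIsAnsN_to_I hk hA) hB
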